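-- pv_equiv track=rewrite | github.com/GALMelo/Number_Counter | python/repeticoes_por_numero.py | getCountValues
-- ===== SOURCE A (Python) =====
-- def getCountValues(dicionarioLocal):
--
--     if dicionarioLocal == {}:
--         return ""
--     copiaDicionarioLocal = dicionarioLocal.copy()
--
--     copiaDicionarioLocal.pop([*copiaDicionarioLocal][0],
--                              copiaDicionarioLocal.get([*copiaDicionarioLocal][0]))
--
--     return "O numero {} repetiu {} vezes\n".format(
--         [*dicionarioLocal][0],
--         dicionarioLocal[[*dicionarioLocal][0]]) + getCountValues(copiaDicionarioLocal)
-- ===== SOURCE B (Python) =====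
-- def getCountValues(dicionarioLocal):
--     result = ""
--     for key, count in dicionarioLocal.items():
--         result += "O numero {} repetiu {} vezes\n".format(key, count)
--     return result
-- ===== Notes on version B (the rewrite author's own statement) =====
-- stated objective: faster
-- what changed: Replaces A's recursion over a freshly copied-and-popped dict at every step (with quadratic string re-concatenation) by a single iterative accumulator loop over items().
import Mathlib
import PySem

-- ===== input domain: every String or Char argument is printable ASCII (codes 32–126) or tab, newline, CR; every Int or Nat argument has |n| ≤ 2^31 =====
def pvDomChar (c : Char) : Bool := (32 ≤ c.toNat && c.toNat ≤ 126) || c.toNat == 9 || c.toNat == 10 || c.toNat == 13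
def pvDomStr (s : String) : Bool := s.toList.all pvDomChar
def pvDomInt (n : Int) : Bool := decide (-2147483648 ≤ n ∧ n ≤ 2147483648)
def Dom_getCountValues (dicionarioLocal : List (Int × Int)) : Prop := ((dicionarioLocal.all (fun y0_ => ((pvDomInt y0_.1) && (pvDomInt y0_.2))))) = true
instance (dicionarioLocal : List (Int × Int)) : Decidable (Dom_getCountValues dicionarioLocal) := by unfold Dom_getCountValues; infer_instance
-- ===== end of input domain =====

-- B replaces A's recursion-over-a-popped-copy with one iterative accumulator loop over items() (simpler).

-- ===== PORT A =====
-- A: empty dict → ""; otherwise format the first key with dict[firstkey] (= its value,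
-- since a dict's assoc list has distinct keys, first match = the head pair), then recurse
-- on the copy with the first key popped (= the tail of the assoc list).
def getCountValues (dicionarioLocal : List (Int × Int)) : String :=
  match dicionarioLocal with
  | [] => ""
  | (k, v) :: rest =>
      ("O numero " ++ PySem.Int.toStr k ++ " repetiu " ++ PySem.Int.toStr v ++ " vezes\n")
        ++ getCountValues rest

-- ===== PORT B =====
-- B: result = ""; for (key, count) in items: result += line; return result.
def getCountValues_alt (dicionarioLocal : List (Int × Int)) : String :=
  dicionarioLocal.foldl
    (fun result kc =>
      result ++ ("O numero " ++ PySem.Int.toStr kc.1 ++ " repetiu " ++ PySem.Int.toStr kc.2 ++ " vezes\n"))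
    ""

-- ===== PRECONDITION & SPEC =====
def Spec_getCountValues (dicionarioLocal : List (Int × Int)) (out : String) : Prop := out = getCountValues_alt dicionarioLocal
instance (dicionarioLocal : List (Int × Int)) (out : String) : Decidable (Spec_getCountValues dicionarioLocal out) := by unfold Spec_getCountValues; infer_instance

-- ===== CLAIM (what is proved, stated in full; the proofs are below) =====
def Claim_equal_getCountValues : Prop := ∀ (dicionarioLocal : List (Int × Int)), Dom_getCountValues dicionarioLocal → Spec_getCountValues dicionarioLocal (getCountValues dicionarioLocal)

-- ===== LEMMAS AND PROOFS =====

-- The accumulator of B's fold factors out in front.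
theorem foldl_acc_out (xs : List (Int × Int)) (acc : String) :
    xs.foldl
      (fun result kc =>
        result ++ ("O numero " ++ PySem.Int.toStr kc.1 ++ " repetiu " ++ PySem.Int.toStr kc.2 ++ " vezes\n"))
      acc
    = acc ++ xs.foldl
      (fun result kc =>
        result ++ ("O numero " ++ PySem.Int.toStr kc.1 ++ " repetiu " ++ PySem.Int.toStr kc.2 ++ " vezes\n"))
      "" := by
  induction xs generalizing acc with
  | nil => simp
  | cons x xs ih =>
      simp only [List.foldl_cons]
      rw [ih, ih ("" ++ _)]
      simp [String.append_assoc]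

theorem a_eq_b (xs : List (Int × Int)) : getCountValues xs = getCountValues_alt xs := by
  induction xs with
  | nil => rfl
  | cons x xs ih =>
      simp only [getCountValues, getCountValues_alt, List.foldl_cons] at *
      rw [ih, foldl_acc_out, foldl_acc_out xs ("" ++ _)]
      simp [String.append_assoc]

-- ===== VERDICT (by name: the statement is the Claim_ definition above) =====
theorem getCountValues_spec : Claim_equal_getCountValues := by
  intro d _
  unfold Spec_getCountValues
  exact a_eq_b d
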